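-- pv_equiv track=rewrite | github.com/codesgil/electors-recognizer-django | core/helpers.py | get_best_face_distance
-- ===== SOURCE A (Python) =====
-- def get_best_face_distance(items):
--     great = items[0]
--     index = 0
--     for pos, item in enumerate(items):
--         if great < item:
--             great = item
--             index = pos
--     return index, great
-- ===== SOURCE B (Python) =====
-- def get_best_face_distance(items):
--     # Divide and conquer: best of a range is the better of the two halves' bests,
--     # preferring the left half on ties (first index of the maximum).
--     def best(lo, hi):
--         if hi - lo == 1:
--             return lo, items[lo]
--         mid = (lo + hi) // 2
--         li, lv = best(lo, mid)
--         ri, rv = best(mid, hi)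
--         if lv < rv:
--             return ri, rv
--         return li, lv
--     return best(0, len(items))
-- ===== Notes on version B (the rewrite author's own statement) =====
-- stated objective: alternative
-- what changed: Replaces A's single left-to-right scan with running (great, index) state by a recursive divide-and-conquer over index ranges: split at the midpoint, take the better half's (index, value), preferring the left half on ties so the first index of the maximum is kept.
import Mathlib
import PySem

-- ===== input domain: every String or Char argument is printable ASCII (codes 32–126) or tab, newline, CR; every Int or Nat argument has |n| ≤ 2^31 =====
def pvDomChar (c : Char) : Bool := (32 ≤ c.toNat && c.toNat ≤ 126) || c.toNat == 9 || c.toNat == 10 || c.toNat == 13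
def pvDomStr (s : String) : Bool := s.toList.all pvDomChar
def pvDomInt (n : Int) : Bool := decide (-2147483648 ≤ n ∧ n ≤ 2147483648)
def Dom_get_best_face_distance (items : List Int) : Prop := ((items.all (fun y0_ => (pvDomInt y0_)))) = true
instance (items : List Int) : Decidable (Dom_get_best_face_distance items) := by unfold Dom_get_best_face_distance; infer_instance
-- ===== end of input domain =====

-- B replaces A's single left-to-right scan carrying (great, index) state with a recursive
-- divide-and-conquer over index ranges (prefer the left half on ties) — an alternative
-- decomposition with the same first-index-of-maximum value.

-- ===== PORT A =====
-- A: great = items[0]; index = 0; for pos, item in enumerate(items): if great < item: great, index = item, pos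
def get_best_face_distance (items : List Int) : Int × Int :=
  match items with
  | [] => (0, 0)  -- items[0] raises IndexError; excluded by Pre_
  | g0 :: _ =>
    let st := (PySem.List.enumerate items 0).foldl
      (fun (s : Int × Int) (p : Int × Int) => if s.1 < p.2 then (p.2, p.1) else s) (g0, 0)
    (st.2, st.1)

-- ===== PORT B =====
-- B's inner `best(lo, hi)`: if hi - lo == 1 return (lo, items[lo]); else split at mid,
-- recurse on both halves, return the right result only if its value is strictly greater.
-- The base guard is `hi - lo ≤ 1` (not `== 1`) and items[lo] gets a default: totality
-- guards only — every call with lo < hi ≤ len(items) takes exactly the Python branches.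
def pvBestRange (items : List Int) (lo hi : Nat) : Int × Int :=
  if hi - lo ≤ 1 then ((lo : Int), (PySem.List.pyGet? items (lo : Int)).getD 0)
  else
    let mid := (lo + hi) / 2
    let L := pvBestRange items lo mid
    let R := pvBestRange items mid hi
    if L.2 < R.2 then R else L
termination_by hi - lo
decreasing_by all_goals omega

def get_best_face_distance_alt (items : List Int) : Int × Int :=
  pvBestRange items 0 items.length

-- ===== PRECONDITION & SPEC =====
-- Pre_ excludes only the empty list, on which A raises IndexError (and B does not return).
def Pre_get_best_face_distance (items : List Int) : Prop := items ≠ []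
instance (items : List Int) : Decidable (Pre_get_best_face_distance items) := by unfold Pre_get_best_face_distance; infer_instance
def pvWitness_get_best_face_distance : List Int := [3, 7, 7, 1]

def Spec_get_best_face_distance (items : List Int) (out : Int × Int) : Prop := out = get_best_face_distance_alt items
instance (items : List Int) (out : Int × Int) : Decidable (Spec_get_best_face_distance items out) := by unfold Spec_get_best_face_distance; infer_instance

-- ===== CLAIM (what is proved, stated in full; the proofs are below) =====
def Claim_equal_get_best_face_distance : Prop := ∀ (items : List Int), Dom_get_best_face_distance items → Pre_get_best_face_distance items → Spec_get_best_face_distance items (get_best_face_distance items)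

-- ===== LEMMAS AND PROOFS =====

-- Reference value both ports are proved equal to: (first index of the maximum, the maximum).
def pvRef (l : List Int) : Int × Int :=
  match PySem.List.max? l (fun x => x) with
  | none => (0, 0)
  | some m => (((PySem.List.index? l m).getD 0 : Nat), m)

-- A's fold extended by one trailing element applies the body once at index l.length.
theorem foldA_snoc (l : List Int) (a g0 : Int) :
    (PySem.List.enumerate (l ++ [a]) 0).foldl
      (fun (s : Int × Int) (p : Int × Int) => if s.1 < p.2 then (p.2, p.1) else s) (g0, 0)
    = (fun (s : Int × Int) (p : Int × Int) => if s.1 < p.2 then (p.2, p.1) else s)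
        ((PySem.List.enumerate l 0).foldl
          (fun (s : Int × Int) (p : Int × Int) => if s.1 < p.2 then (p.2, p.1) else s) (g0, 0))
        ((l.length : Int), a) := by
  rw [PySem.List.enumerate_append, List.foldl_append]
  simp [PySem.List.enumerate_cons, PySem.List.enumerate_nil]

-- A computes the reference value on every nonempty list.
theorem a_eq_ref (items : List Int) (h : items ≠ []) :
    get_best_face_distance items = pvRef items := by
  induction items using List.reverseRecOn with
  | nil => exact absurd rfl h
  | append_singleton l a ih =>
    cases l with
    | nil =>
      simp [get_best_face_distance, pvRef, PySem.List.enumerate_cons,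
        PySem.List.enumerate_nil, PySem.List.max?_id_cons]
    | cons x t =>
      have hne : x :: t ≠ [] := by simp
      have ih' := ih hne
      have hM : PySem.List.max? (x :: t) (fun y => y) = some (t.foldl max x) :=
        PySem.List.max?_id_cons x t
      have hMmem : t.foldl max x ∈ x :: t := PySem.List.max?_mem hM
      have hMmax : ∀ y ∈ x :: t, y ≤ t.foldl max x := by
        intro y hy; exact PySem.List.max?_isMax hM y hy
      obtain ⟨k, hk⟩ : ∃ k, PySem.List.index? (x :: t) (t.foldl max x) = some k := by
        have := (PySem.List.index?_isSome_iff (xs := x :: t) (v := t.foldl max x)).2 hMmem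
        exact Option.isSome_iff_exists.mp this
      have hA : get_best_face_distance (x :: t) =
          (((PySem.List.enumerate (x :: t) 0).foldl
            (fun (s : Int × Int) (p : Int × Int) => if s.1 < p.2 then (p.2, p.1) else s) (x, 0)).2,
           ((PySem.List.enumerate (x :: t) 0).foldl
            (fun (s : Int × Int) (p : Int × Int) => if s.1 < p.2 then (p.2, p.1) else s) (x, 0)).1) := rfl
      have hA' : get_best_face_distance ((x :: t) ++ [a]) =
          (((PySem.List.enumerate ((x :: t) ++ [a]) 0).foldl
            (fun (s : Int × Int) (p : Int × Int) => if s.1 < p.2 then (p.2, p.1) else s) (x, 0)).2,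
           ((PySem.List.enumerate ((x :: t) ++ [a]) 0).foldl
            (fun (s : Int × Int) (p : Int × Int) => if s.1 < p.2 then (p.2, p.1) else s) (x, 0)).1) := rfl
      set st := (PySem.List.enumerate (x :: t) 0).foldl
        (fun (s : Int × Int) (p : Int × Int) => if s.1 < p.2 then (p.2, p.1) else s) (x, 0) with hst
      have hk' : List.idxOf? (t.foldl max x) (x :: t) = some k := by
        rw [← PySem.List.index?_eq_idxOf?]; exact hk
      have hB : pvRef (x :: t) = ((k : Int), t.foldl max x) := by
        simp [pvRef, hM, hk']
      have hstval : st = (t.foldl max x, (k : Int)) := by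
        have := ih'
        rw [hA, hB] at this
        exact Prod.ext (congrArg Prod.snd this) (congrArg Prod.fst this)
      rw [hA', foldA_snoc, ← hst, hstval]
      by_cases hlt : t.foldl max x < a
      · have hanotmem : a ∉ x :: t := fun hmem => absurd (hMmax a hmem) (not_le.mpr hlt)
        have hmax' : PySem.List.max? ((x :: t) ++ [a]) (fun y => y) = some a := by
          have : ((t ++ [a]).foldl max x) = a := by
            rw [List.foldl_append]
            simp [max_eq_right (le_of_lt hlt)]
          simpa [this] using (PySem.List.max?_id_cons x (t ++ [a]))
        have hidx' : PySem.List.index? ((x :: t) ++ [a]) a = some (x :: t).length :=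
          PySem.List.index?_append_singleton_self (x :: t) a hanotmem
        simp only [pvRef, hmax', hidx']
        simp [hlt]
      · have hmax' : PySem.List.max? ((x :: t) ++ [a]) (fun y => y) = some (t.foldl max x) := by
          have : ((t ++ [a]).foldl max x) = t.foldl max x := by
            rw [List.foldl_append]
            simp [max_eq_left (not_lt.mp hlt)]
          simpa [this] using (PySem.List.max?_id_cons x (t ++ [a]))
        have hidx' : PySem.List.index? ((x :: t) ++ [a]) (t.foldl max x) = some k := by
          rw [PySem.List.index?_append_of_mem _ hMmem, hk]
        simp only [pvRef, hmax', hidx']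
        simp [hlt]

-- foldl max commutes with a max in the initial accumulator.
theorem foldl_max_max (l : List Int) : ∀ (a b : Int), l.foldl max (max a b) = max a (l.foldl max b) := by
  induction l with
  | nil => intro a b; rfl
  | cons c t ih =>
    intro a b
    simp only [List.foldl_cons]
    rw [max_assoc, ih]

-- index? over append when the value misses the prefix.
theorem index?_append_of_notMem (v : Int) (l t : List Int) (h : v ∉ l) :
    PySem.List.index? (l ++ t) v = (PySem.List.index? t v).map (fun k => k + l.length) := by
  induction l with
  | nil => simp
  | cons x l ih =>
    have hxv : x ≠ v := fun he => h (by simp [he])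
    have hvl : v ∉ l := fun hm => h (by simp [hm])
    rw [List.cons_append, PySem.List.index?_cons_of_ne _ hxv, ih hvl]
    cases PySem.List.index? t v with
    | none => rfl
    | some k => simp; omega

-- The reference value of a concatenation of nonempty lists, combined B's way.
theorem ref_append (s1 s2 : List Int) (h1 : s1 ≠ []) (h2 : s2 ≠ []) :
    pvRef (s1 ++ s2) = if (pvRef s1).2 < (pvRef s2).2
      then ((s1.length : Int) + (pvRef s2).1, (pvRef s2).2)
      else pvRef s1 := by
  obtain ⟨x, t1, rfl⟩ := List.exists_cons_of_ne_nil h1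
  obtain ⟨y, t2, rfl⟩ := List.exists_cons_of_ne_nil h2
  set m1 := t1.foldl max x with hm1
  set m2 := t2.foldl max y with hm2
  have hM1 : PySem.List.max? (x :: t1) (fun v => v) = some m1 := PySem.List.max?_id_cons x t1
  have hM2 : PySem.List.max? (y :: t2) (fun v => v) = some m2 := PySem.List.max?_id_cons y t2
  have hM1mem : m1 ∈ x :: t1 := PySem.List.max?_mem hM1
  have hM2mem : m2 ∈ y :: t2 := PySem.List.max?_mem hM2
  have hM1max : ∀ v ∈ x :: t1, v ≤ m1 := fun v hv => PySem.List.max?_isMax hM1 v hv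
  obtain ⟨k1, hk1⟩ := Option.isSome_iff_exists.mp
    ((PySem.List.index?_isSome_iff (xs := x :: t1) (v := m1)).2 hM1mem)
  obtain ⟨k2, hk2⟩ := Option.isSome_iff_exists.mp
    ((PySem.List.index?_isSome_iff (xs := y :: t2) (v := m2)).2 hM2mem)
  have hMcat : PySem.List.max? ((x :: t1) ++ (y :: t2)) (fun v => v) = some (max m1 m2) := by
    have : (t1 ++ y :: t2).foldl max x = max m1 m2 := by
      rw [List.foldl_append]
      simp only [List.foldl_cons]
      rw [← hm1, foldl_max_max, ← hm2]
    simpa [this] using (PySem.List.max?_id_cons x (t1 ++ y :: t2))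
  have hk1' : List.idxOf? m1 (x :: t1) = some k1 := by
    rw [← PySem.List.index?_eq_idxOf?]; exact hk1
  have hk2' : List.idxOf? m2 (y :: t2) = some k2 := by
    rw [← PySem.List.index?_eq_idxOf?]; exact hk2
  have hr1 : pvRef (x :: t1) = ((k1 : Int), m1) := by simp [pvRef, hM1, hk1']
  have hr2 : pvRef (y :: t2) = ((k2 : Int), m2) := by simp [pvRef, hM2, hk2']
  by_cases hlt : m1 < m2
  · have hmax : max m1 m2 = m2 := max_eq_right (le_of_lt hlt)
    have hnot : m2 ∉ x :: t1 := fun hm => absurd (hM1max m2 hm) (not_le.mpr hlt)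
    have hidx' : List.idxOf? m2 ((x :: t1) ++ (y :: t2)) = some (k2 + (x :: t1).length) := by
      rw [← PySem.List.index?_eq_idxOf?, index?_append_of_notMem _ _ _ hnot, hk2]; rfl
    have hMcat2 : PySem.List.max? (x :: (t1 ++ y :: t2)) (fun v => v) = some m2 := by
      rw [← List.cons_append, hMcat, hmax]
    have hidx2 : List.idxOf? m2 (x :: (t1 ++ y :: t2)) = some (k2 + (x :: t1).length) := by
      rw [← List.cons_append]; exact hidx'
    have hrc : pvRef ((x :: t1) ++ (y :: t2)) = (((k2 + (x :: t1).length : Nat) : Int), m2) := by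
      simp [pvRef, hMcat2, hidx2]
    rw [hrc, hr1, hr2, if_pos hlt]
    simp only [Prod.mk.injEq]
    exact ⟨by push_cast; ring, trivial⟩
  · have hmax : max m1 m2 = m1 := max_eq_left (not_lt.mp hlt)
    have hidx' : List.idxOf? m1 ((x :: t1) ++ (y :: t2)) = some k1 := by
      rw [← PySem.List.index?_eq_idxOf?, PySem.List.index?_append_of_mem _ hM1mem, hk1]
    have hMcat2 : PySem.List.max? (x :: (t1 ++ y :: t2)) (fun v => v) = some m1 := by
      rw [← List.cons_append, hMcat, hmax]
    have hidx2 : List.idxOf? m1 (x :: (t1 ++ y :: t2)) = some k1 := by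
      rw [← List.cons_append]; exact hidx'
    have hrc : pvRef ((x :: t1) ++ (y :: t2)) = ((k1 : Int), m1) := by
      simp [pvRef, hMcat2, hidx2]
    rw [hrc, hr1, hr2, if_neg hlt]

-- Splitting the segment items[lo:hi] at mid.
theorem seg_split (items : List Int) (lo mid hi : Nat) (h1 : lo ≤ mid) (h2 : mid ≤ hi) :
    (items.drop lo).take (hi - lo)
      = (items.drop lo).take (mid - lo) ++ (items.drop mid).take (hi - mid) := by
  have hsum : hi - lo = (mid - lo) + (hi - mid) := by omega
  have hd : (items.drop lo).drop (mid - lo) = items.drop mid := by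
    rw [List.drop_drop]
    congr 1
    omega
  rw [hsum, List.take_add, hd]

-- B's range recursion computes lo plus the reference value of items[lo:hi].
theorem bestRange_ref (items : List Int) :
    ∀ (n lo hi : Nat), hi - lo = n → lo < hi → hi ≤ items.length →
      pvBestRange items lo hi
        = ((lo : Int) + (pvRef ((items.drop lo).take (hi - lo))).1,
           (pvRef ((items.drop lo).take (hi - lo))).2) := by
  intro n
  induction n using Nat.strong_induction_on with
  | _ n ih =>
    intro lo hi hn hlt hlen
    by_cases hbase : hi - lo ≤ 1
    · -- hi = lo + 1; the segment is the singleton [items[lo]]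
      have hhi : hi = lo + 1 := by omega
      have hlo : lo < items.length := by omega
      have hseg : (items.drop lo).take (hi - lo) = [items[lo]] := by
        rw [hhi]
        have : lo + 1 - lo = 1 := by omega
        rw [this, List.drop_eq_getElem_cons hlo, List.take_succ_cons, List.take_zero]
      have hget : PySem.List.pyGet? items (lo : Int) = some items[lo] := by
        rw [PySem.List.pyGet?_natCast]
        exact List.getElem?_eq_getElem hlo
      rw [pvBestRange, if_pos hbase, hseg, hget]
      simp [pvRef, PySem.List.max?_id_cons]
    · -- recursive case
      have h2 : 2 ≤ hi - lo := by omega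
      set mid := (lo + hi) / 2 with hmid
      have hlom : lo < mid := by omega
      have hmh : mid < hi := by omega
      have ihL := ih (mid - lo) (by omega) lo mid rfl hlom (by omega)
      have ihR := ih (hi - mid) (by omega) mid hi rfl hmh hlen
      have hne1 : (items.drop lo).take (mid - lo) ≠ [] := by
        apply List.ne_nil_of_length_pos
        simp only [List.length_take, List.length_drop]
        omega
      have hne2 : (items.drop mid).take (hi - mid) ≠ [] := by
        apply List.ne_nil_of_length_pos
        simp only [List.length_take, List.length_drop]
        omega
      have hlen1 : ((items.drop lo).take (mid - lo)).length = mid - lo := by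
        simp only [List.length_take, List.length_drop]
        omega
      rw [pvBestRange, if_neg hbase]
      simp only [← hmid]
      rw [ihL, ihR, seg_split items lo mid hi (by omega) (by omega),
        ref_append _ _ hne1 hne2, hlen1]
      by_cases hc : (pvRef ((items.drop lo).take (mid - lo))).2
          < (pvRef ((items.drop mid).take (hi - mid))).2
      · rw [if_pos hc, if_pos hc]
        simp only [Prod.mk.injEq]
        exact ⟨by omega, trivial⟩
      · rw [if_neg hc, if_neg hc]

-- B computes the reference value on every nonempty list.
theorem b_eq_ref (items : List Int) (h : items ≠ []) :
    get_best_face_distance_alt items = pvRef items := by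
  have hlen : 0 < items.length := List.length_pos_of_ne_nil h
  have := bestRange_ref items items.length 0 items.length (by omega) hlen (le_refl _)
  rw [get_best_face_distance_alt, this]
  simp

-- ===== VERDICT (by name: the statement is the Claim_ definition above) =====
theorem get_best_face_distance_spec : Claim_equal_get_best_face_distance := by
  intro items _ hpre
  show get_best_face_distance items = get_best_face_distance_alt items
  rw [a_eq_ref items hpre, b_eq_ref items hpre]
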